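-- pv_equiv track=rewrite | github.com/emkael/deal-convert | dealconvert/dto.py | get_vulnerability
-- ===== SOURCE A (Python) =====
-- def get_vulnerability(board_no):
--     board_no = board_no % 16
--     vuln = {'NS': [False,
--                    False, True, False, True,
--                    True, False, True, False,
--                    False, True, False, True,
--                    True, False, True],
--             'EW': [True,
--                    False, False, True, True,
--                    False, True, True, False,
--                    True, True, False, False,
--                    True, False, False]}
--     return { pair: vuln[pair][board_no] for pair in vuln }
-- ===== SOURCE B (Python) =====
-- def get_vulnerability(board_no):
--     m = board_no % 16 or 16
--     code = ((m - 1) + (m - 1) // 4) % 4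
--     return {'NS': bool(code & 1), 'EW': bool(code & 2)}
-- ===== Notes on version B (the rewrite author's own statement) =====
-- stated objective: simpler
-- what changed: Replaces the two 16-entry lookup tables with a closed-form arithmetic encoding of the vulnerability cycle (code = ((m-1)+(m-1)//4) % 4 with m = board_no % 16 or 16).
import Mathlib
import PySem

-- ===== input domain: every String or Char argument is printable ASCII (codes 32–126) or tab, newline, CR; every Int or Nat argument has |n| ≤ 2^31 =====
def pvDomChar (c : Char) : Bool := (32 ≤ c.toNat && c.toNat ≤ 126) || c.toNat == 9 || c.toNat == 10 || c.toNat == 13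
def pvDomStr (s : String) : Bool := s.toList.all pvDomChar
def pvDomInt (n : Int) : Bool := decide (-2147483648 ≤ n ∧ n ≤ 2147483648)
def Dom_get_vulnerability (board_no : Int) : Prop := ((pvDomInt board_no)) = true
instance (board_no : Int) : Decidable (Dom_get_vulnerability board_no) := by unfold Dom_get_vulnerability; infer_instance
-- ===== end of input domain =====

-- ===== PORT A =====
-- Header: B replaces A's 32-entry NS/EW lookup tables with a closed-form arithmetic
-- encoding of the 16-board vulnerability cycle (objective: simpler).
-- Index board_no % 16 is always in [0,16), so the list indexings never fail;
-- pyGet? … |>.getD false is exact here.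
def get_vulnerability (board_no : Int) : List (String × Bool) :=
  let b := PySem.Int.mod board_no 16
  let ns : List Bool := [false,
    false, true, false, true,
    true, false, true, false,
    false, true, false, true,
    true, false, true]
  let ew : List Bool := [true,
    false, false, true, true,
    false, true, true, false,
    true, true, false, false,
    true, false, false]
  [("NS", (PySem.List.pyGet? ns b).getD false),
   ("EW", (PySem.List.pyGet? ew b).getD false)]

-- ===== PORT B =====
def get_vulnerability_alt (board_no : Int) : List (String × Bool) :=
  let r := PySem.Int.mod board_no 16
  let m : Int := if r = 0 then 16 else r   -- Python `board_no % 16 or 16`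
  let code := PySem.Int.mod ((m - 1) + PySem.Int.floordiv (m - 1) 4) 4
  [("NS", code.land 1 ≠ 0),
   ("EW", code.land 2 ≠ 0)]

-- ===== PRECONDITION & SPEC =====
def Spec_get_vulnerability (board_no : Int) (out : List (String × Bool)) : Prop := out = get_vulnerability_alt board_no
instance (board_no : Int) (out : List (String × Bool)) : Decidable (Spec_get_vulnerability board_no out) := by unfold Spec_get_vulnerability; infer_instance

-- ===== CLAIM (what is proved, stated in full; the proofs are below) =====
def Claim_equal_get_vulnerability : Prop := ∀ (board_no : Int), Dom_get_vulnerability board_no → Spec_get_vulnerability board_no (get_vulnerability board_no)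

-- ===== LEMMAS AND PROOFS =====

-- ===== VERDICT (by name: the statement is the Claim_ definition above) =====
theorem get_vulnerability_spec : Claim_equal_get_vulnerability := by
  intro board_no _
  unfold Spec_get_vulnerability get_vulnerability get_vulnerability_alt
  have h16 : (0:Int) < 16 := by norm_num
  have hb : PySem.Int.mod board_no 16 = board_no % 16 :=
    PySem.Int.mod_eq_emod_of_pos (by norm_num)
  rw [hb]
  have h0 : 0 ≤ board_no % 16 := Int.emod_nonneg _ (by norm_num)
  have h1 : board_no % 16 < 16 := Int.emod_lt_of_pos _ (by norm_num)
  generalize hr : board_no % 16 = r at *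
  interval_cases r <;> decide
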